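-- pv_equiv track=rewrite | github.com/blaire101/LeetCode | Array_and_linkedList/code/1_easy.RemovingDuplicates.py | remove_duplicates_elements_from_sort_array
-- ===== SOURCE A (Python) =====
-- from typing import List
--
-- def remove_duplicates_elements_from_sort_array(nums: List[int]) -> List[int]:
--     """
--     Removes elements from a sorted list that appear more than once.
--     Returns a new list containing only the elements that appear exactly once.
--
--     :param nums: List[int] - A sorted list of integers which may contain duplicates
--     :return: List[int] - A list of integers without elements that appear more than once
--     """
--     if not nums:
--         return []
--
--     unique_elements = []
--     i = 0
--     n = len(nums)
--
--     while i < n: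
--         if (i == n - 1) or (nums[i] != nums[i + 1]):
--             unique_elements.append(nums[i])
--             i += 1
--         else:
--             while i < n - 1 and nums[i] == nums[i + 1]:
--                 i += 2
--
--     return unique_elements
-- ===== SOURCE B (Python) =====
-- from typing import List
-- from itertools import groupby
--
-- def remove_duplicates_elements_from_sort_array(nums: List[int]) -> List[int]:
--     # Keep one copy of each maximal run of equal adjacent elements whose length is odd.
--     return [v for v, run in groupby(nums) if sum(1 for _ in run) % 2 == 1]
-- ===== Notes on version B (the rewrite author's own statement) =====
-- stated objective: simpler
-- what changed: Replaced A's index-based while loop with an inner pair-skipping while by a single run-length grouping pass (itertools.groupby) that keeps one copy of each maximal run of equal adjacent elements whose length is odd.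
import Mathlib
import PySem

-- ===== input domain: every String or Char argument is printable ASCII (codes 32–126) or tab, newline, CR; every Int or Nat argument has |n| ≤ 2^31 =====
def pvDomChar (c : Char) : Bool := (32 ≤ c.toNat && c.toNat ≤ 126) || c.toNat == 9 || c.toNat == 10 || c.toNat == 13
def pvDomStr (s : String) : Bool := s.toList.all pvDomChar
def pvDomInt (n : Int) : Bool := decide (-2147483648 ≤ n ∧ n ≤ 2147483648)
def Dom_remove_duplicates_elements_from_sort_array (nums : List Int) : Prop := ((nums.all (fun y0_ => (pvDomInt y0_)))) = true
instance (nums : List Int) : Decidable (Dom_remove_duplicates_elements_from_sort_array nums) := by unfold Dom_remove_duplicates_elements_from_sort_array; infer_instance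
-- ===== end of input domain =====

-- B replaces A's index/while-loop pair-skipping with a single run-length grouping pass
-- (keep one copy of each maximal run of odd length); objective: simpler.

-- ===== PORT A =====
-- inner 'while i < n - 1 and nums[i] == nums[i + 1]: i += 2'
def pvInnerA (nums : List Int) (n i : Nat) : Nat :=
  if i + 1 < n ∧ nums.getD i 0 = nums.getD (i + 1) 0 then pvInnerA nums n (i + 2) else i
termination_by n - i
decreasing_by omega

theorem pvInnerA_le (nums : List Int) (n i : Nat) : i ≤ pvInnerA nums n i := by
  rw [pvInnerA]
  split
  · exact le_trans (by omega) (pvInnerA_le nums n (i + 2))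
  · exact le_refl i
termination_by n - i
decreasing_by omega

theorem pvInnerA_gt (nums : List Int) (n i : Nat)
    (h : i + 1 < n ∧ nums.getD i 0 = nums.getD (i + 1) 0) : i < pvInnerA nums n i := by
  rw [pvInnerA]
  simp only [h]
  exact lt_of_lt_of_le (by omega) (pvInnerA_le nums n (i + 2))

-- outer 'while i < n' loop of A (indices always in range in executed paths; getD 0 is the access)
def pvLoopA (nums : List Int) (n i : Nat) : List Int :=
  if h : i < n then
    if hc : i = n - 1 ∨ nums.getD i 0 ≠ nums.getD (i + 1) 0 then
      nums.getD i 0 :: pvLoopA nums n (i + 1)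
    else
      pvLoopA nums n (pvInnerA nums n i)
  else []
termination_by n - i
decreasing_by
  · omega
  · have h2 : i + 1 < n ∧ nums.getD i 0 = nums.getD (i + 1) 0 := by
      push Not at hc; exact ⟨by omega, hc.2⟩
    have := pvInnerA_gt nums n i h2
    omega

def remove_duplicates_elements_from_sort_array (nums : List Int) : List Int :=
  if nums = [] then [] else pvLoopA nums nums.length 0

-- ===== PORT B =====
-- groupby(nums): peel one maximal run of equal leading elements at a time; keep its value iff odd length
def remove_duplicates_elements_from_sort_array_alt : List Int → List Int
  | [] => []
  | x :: xs =>
    let run := xs.takeWhile (fun y => y == x)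
    let rest := xs.dropWhile (fun y => y == x)
    if (run.length + 1) % 2 = 1 then x :: remove_duplicates_elements_from_sort_array_alt rest
    else remove_duplicates_elements_from_sort_array_alt rest
termination_by l => l.length
decreasing_by
  all_goals
    simp only [List.length_cons]
    have := List.length_dropWhile_le (fun y => y == x) xs
    omega

-- ===== PRECONDITION & SPEC =====
def Spec_remove_duplicates_elements_from_sort_array (nums : List Int) (out : List Int) : Prop := out = remove_duplicates_elements_from_sort_array_alt nums
instance (nums : List Int) (out : List Int) : Decidable (Spec_remove_duplicates_elements_from_sort_array nums out) := by unfold Spec_remove_duplicates_elements_from_sort_array; infer_instance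

-- ===== CLAIM (what is proved, stated in full; the proofs are below) =====
def Claim_equal_remove_duplicates_elements_from_sort_array : Prop := ∀ (nums : List Int), Dom_remove_duplicates_elements_from_sort_array nums → Spec_remove_duplicates_elements_from_sort_array nums (remove_duplicates_elements_from_sort_array nums)

-- ===== LEMMAS AND PROOFS =====
-- shorthand for the proofs
theorem altB_nil : remove_duplicates_elements_from_sort_array_alt [] = [] := by
  rw [remove_duplicates_elements_from_sort_array_alt]

-- dropping two equal leading elements does not change B's result (run parity is preserved)
theorem altB_cons_cons (x : Int) (t : List Int) :
    remove_duplicates_elements_from_sort_array_alt (x :: x :: t) =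
    remove_duplicates_elements_from_sort_array_alt t := by
  rw [remove_duplicates_elements_from_sort_array_alt]
  cases t with
  | nil =>
      simp [List.takeWhile, List.dropWhile, altB_nil]
  | cons y t' =>
      by_cases hxy : y = x
      · subst hxy
        rw [remove_duplicates_elements_from_sort_array_alt]
        simp only [List.takeWhile_cons, List.dropWhile_cons, beq_self_eq_true, if_true,
          List.length_cons]
        have hpar : ((t'.takeWhile (fun z => z == y)).length + 1 + 1 + 1) % 2
            = ((t'.takeWhile (fun z => z == y)).length + 1) % 2 := by omega
        rw [hpar]
      · have hbeq : (y == x) = false := by simp [hxy]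
        simp [hbeq]

theorem inner_drop (nums : List Int) (i : Nat) :
    remove_duplicates_elements_from_sort_array_alt (nums.drop (pvInnerA nums nums.length i)) =
    remove_duplicates_elements_from_sort_array_alt (nums.drop i) := by
  rw [pvInnerA]
  split
  · rename_i h
    have hi : i < nums.length := by omega
    have hi1 : i + 1 < nums.length := h.1
    have hd : nums.drop i = nums[i] :: nums.drop (i + 1) := List.drop_eq_getElem_cons hi
    have hd1 : nums.drop (i + 1) = nums[i + 1] :: nums.drop (i + 2) :=
      List.drop_eq_getElem_cons hi1
    have hg : nums[i] = nums[i + 1] := by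
      have := h.2
      rwa [List.getD_eq_getElem nums 0 hi, List.getD_eq_getElem nums 0 hi1] at this
    have ih := inner_drop nums (i + 2)
    rw [ih, hd, hd1, hg, altB_cons_cons]
  · rfl
termination_by nums.length - i
decreasing_by omega

theorem loopA_eq_alt (nums : List Int) (i : Nat) :
    pvLoopA nums nums.length i =
    remove_duplicates_elements_from_sort_array_alt (nums.drop i) := by
  rw [pvLoopA]
  split
  · rename_i h
    have hd : nums.drop i = nums[i] :: nums.drop (i + 1) := List.drop_eq_getElem_cons h
    have hgi : nums.getD i 0 = nums[i] := List.getD_eq_getElem nums 0 h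
    split
    · rename_i hc
      have ih := loopA_eq_alt nums (i + 1)
      by_cases h1 : i + 1 < nums.length
      · -- branch taken because nums[i] ≠ nums[i+1]
        have hg1 : nums.getD (i + 1) 0 = nums[i + 1] := List.getD_eq_getElem nums 0 h1
        have hne : nums[i] ≠ nums[i + 1] := by
          rcases hc with hc | hc
          · omega
          · rwa [hgi, hg1] at hc
        have hd1 : nums.drop (i + 1) = nums[i + 1] :: nums.drop (i + 2) :=
          List.drop_eq_getElem_cons h1
        rw [hd, remove_duplicates_elements_from_sort_array_alt]
        have hbeq : (nums[i + 1] == nums[i]) = false := by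
          simp [Ne.symm hne]
        rw [hd1]
        simp only [List.takeWhile_cons, List.dropWhile_cons, hbeq, if_false, Bool.false_eq_true,
          List.length_nil]
        rw [← hd1, ih, hgi]
        simp
      · -- i is the last index
        have hlast : nums.drop (i + 1) = [] := List.drop_eq_nil_of_le (by omega)
        rw [hd, hlast, remove_duplicates_elements_from_sort_array_alt]
        simp only [List.takeWhile_nil, List.dropWhile_nil, List.length_nil]
        rw [ih, hlast, hgi]
        simp [altB_nil]
    · rename_i hc
      push Not at hc
      have h2 : i + 1 < nums.length ∧ nums.getD i 0 = nums.getD (i + 1) 0 :=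
        ⟨by omega, hc.2⟩
      have hgt := pvInnerA_gt nums nums.length i h2
      have ih := loopA_eq_alt nums (pvInnerA nums nums.length i)
      rw [ih, inner_drop]
  · rename_i h
    rw [List.drop_eq_nil_of_le (by omega), altB_nil]
termination_by nums.length - i
decreasing_by
  all_goals omega

-- ===== VERDICT (by name: the statement is the Claim_ definition above) =====
theorem remove_duplicates_elements_from_sort_array_spec : Claim_equal_remove_duplicates_elements_from_sort_array := by
  intro nums _
  unfold Spec_remove_duplicates_elements_from_sort_array remove_duplicates_elements_from_sort_array
  split
  · rename_i h; rw [h, altB_nil]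
  · rw [loopA_eq_alt, List.drop_zero]
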